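-- pv_equiv track=rewrite | github.com/inspirehep/inspirehep | backend/inspirehep/editor/authorlist_utils.py | determine_aff_type_character
-- ===== SOURCE A (Python) =====
-- def determine_aff_type_character(char_list):
--     """
--     Guess whether affiliation are by number, letter or symbols (e.g. dagger).
--     Numbers and letters should not be mixed.
--     """
--
--     aff_type = None
--     for char in char_list:
--         if aff_type:
--             if aff_type == "alpha":
--                 if not char.isalpha():
--                     return None
--             elif aff_type == "digit" and not char.isdigit():
--                 return None
--         else:
--             if char.isalpha():
--                 aff_type = "alpha"
--             elif char.isdigit():
--                 aff_type = "digit"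
--             else:
--                 aff_type = "symbol"
--                 break
--     return aff_type
-- ===== SOURCE B (Python) =====
-- def determine_aff_type_character(char_list):
--     """
--     Guess whether affiliation are by number, letter or symbols (e.g. dagger).
--     Numbers and letters should not be mixed.
--     """
--     def classify(ch):
--         if ch.isalpha():
--             return "alpha"
--         if ch.isdigit():
--             return "digit"
--         return "symbol"
--
--     classes = [classify(ch) for ch in char_list]
--     if not classes:
--         return None
--     if classes[0] == "symbol":
--         return "symbol"
--     return classes[0] if len(set(classes)) == 1 else None
-- ===== Notes on version B (the rewrite author's own statement) =====
-- stated objective: alternative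
-- what changed: Instead of A's stateful early-exit loop, B maps every element to a class label in one staged pass, answers 'symbol' from the head label, and decides homogeneity by collapsing the label list into a set and checking its cardinality is 1.
import Mathlib
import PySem

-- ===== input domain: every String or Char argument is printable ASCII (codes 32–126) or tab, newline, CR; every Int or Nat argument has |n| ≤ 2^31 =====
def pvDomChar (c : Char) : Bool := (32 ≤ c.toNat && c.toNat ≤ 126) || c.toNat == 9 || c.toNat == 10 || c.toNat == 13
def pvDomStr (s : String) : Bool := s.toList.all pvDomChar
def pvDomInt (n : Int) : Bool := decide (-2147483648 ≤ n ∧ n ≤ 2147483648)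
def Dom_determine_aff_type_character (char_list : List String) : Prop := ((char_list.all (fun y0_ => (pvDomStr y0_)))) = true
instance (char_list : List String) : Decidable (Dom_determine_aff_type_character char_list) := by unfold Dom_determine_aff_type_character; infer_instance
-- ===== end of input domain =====

-- B: label every element with its class, then decide from the head label and the SET of labels (|set|=1); replaces A's stateful early-exit loop.
-- ===== PORT A =====
-- loop state: aff_type (Option String); an early 'return None' short-circuits, 'symbol' breaks.
def pvGoA (char_list : List String) (aff_type : Option String) : Option String :=
  match char_list with
  | [] => aff_type
  | char :: rest =>
    match aff_type with
    | some t =>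
      if t == "alpha" then
        if !(PySem.Str.strIsalpha char) then none else pvGoA rest aff_type
      else if t == "digit" && !(PySem.Str.strIsdigit char) then none
      else pvGoA rest aff_type
    | none =>
      if PySem.Str.strIsalpha char then pvGoA rest (some "alpha")
      else if PySem.Str.strIsdigit char then pvGoA rest (some "digit")
      else some "symbol"

def determine_aff_type_character (char_list : List String) : Option String :=
  pvGoA char_list none

-- ===== PORT B =====
def pvClassify (ch : String) : String :=
  if PySem.Str.strIsalpha ch then "alpha"
  else if PySem.Str.strIsdigit ch then "digit"
  else "symbol"

def determine_aff_type_character_alt (char_list : List String) : Option String :=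
  let classes := char_list.map pvClassify
  match classes with
  | [] => none
  | c0 :: _ =>
    if c0 == "symbol" then some "symbol"
    else if PySem.Set.len (PySem.Set.ofList classes) == 1 then some c0 else none

-- ===== PRECONDITION & SPEC =====
def Spec_determine_aff_type_character (char_list : List String) (out : Option String) : Prop := out = determine_aff_type_character_alt char_list
instance (char_list : List String) (out : Option String) : Decidable (Spec_determine_aff_type_character char_list out) := by unfold Spec_determine_aff_type_character; infer_instance

-- ===== CLAIM =====
def Claim_equal_determine_aff_type_character : Prop := ∀ (char_list : List String), Dom_determine_aff_type_character char_list → Spec_determine_aff_type_character char_list (determine_aff_type_character char_list)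

-- ===== LEMMAS AND PROOFS =====

lemma pvGoA_alpha (l : List String) :
    pvGoA l (some "alpha") = if l.all (fun c => PySem.Str.strIsalpha c) then some "alpha" else none := by
  induction l with
  | nil => simp [pvGoA]
  | cons c rest ih =>
    simp only [pvGoA, List.all_cons, show (("alpha":String) == "alpha") = true by decide, if_true]
    by_cases h : PySem.Chars.strIsalpha c.toList = true <;> simp [h, ih]

lemma pvGoA_digit (l : List String) :
    pvGoA l (some "digit") = if l.all (fun c => PySem.Str.strIsdigit c) then some "digit" else none := by
  induction l with
  | nil => simp [pvGoA]
  | cons c rest ih =>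
    simp only [pvGoA, List.all_cons, show (("digit":String) == "alpha") = false by decide,
      show (("digit":String) == "digit") = true by decide, Bool.true_and, if_false]
    by_cases h : PySem.Chars.strIsdigit c.toList = true <;> simp [h, ih]

-- len(set(c0::cs)) == 1 exactly when every label in cs equals c0
lemma set_len_one (c0 : String) (cs : List String) :
    (PySem.Set.len (PySem.Set.ofList (c0 :: cs)) == 1) = cs.all (fun c => c == c0) := by
  rw [PySem.Set.ofList_cons]
  rcases h : PySem.Set.discard (PySem.Set.ofList cs) c0 with _ | ⟨y, t⟩
  · have : ∀ c ∈ cs, c = c0 := by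
      intro c hc
      by_contra hne
      have : c ∈ PySem.Set.discard (PySem.Set.ofList cs) c0 := by
        rw [PySem.Set.mem_discard]
        exact ⟨(PySem.Set.mem_ofList _ _).mpr hc, hne⟩
      simp [h] at this
    simp [PySem.Set.len, List.all_eq_true]
    intro c hc; exact this c hc
  · have hy : y ∈ PySem.Set.discard (PySem.Set.ofList cs) c0 := by simp [h]
    rw [PySem.Set.mem_discard, PySem.Set.mem_ofList] at hy
    have : cs.all (fun c => c == c0) = false := by
      simp [List.all_eq_true]
      exact ⟨y, hy.1, hy.2⟩
    rw [this]
    simp [PySem.Set.len]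
    omega

lemma classify_eq_alpha (c : String) :
    (pvClassify c == "alpha") = PySem.Chars.strIsalpha c.toList := by
  simp only [pvClassify, PySem.Str.strIsalpha_eq, PySem.Str.strIsdigit_eq]
  by_cases h : PySem.Chars.strIsalpha c.toList = true
  · simp [h]
  · by_cases h2 : PySem.Chars.strIsdigit c.toList = true <;> simp [h, h2]

lemma classify_eq_digit (c : String) :
    (pvClassify c == "digit") = (!(PySem.Chars.strIsalpha c.toList) && PySem.Chars.strIsdigit c.toList) := by
  simp only [pvClassify, PySem.Str.strIsalpha_eq, PySem.Str.strIsdigit_eq]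
  by_cases h : PySem.Chars.strIsalpha c.toList = true
  · simp [h]
  · by_cases h2 : PySem.Chars.strIsdigit c.toList = true <;> simp [h, h2]

lemma digit_not_alpha (c : Char) (h : PySem.Chars.isdigit c = true) : PySem.Chars.isalpha c = false := by
  simp only [PySem.Chars.isdigit, PySem.Chars.isalpha, PySem.Chars.isupper, PySem.Chars.islower,
    Bool.and_eq_true, decide_eq_true_eq, Bool.or_eq_false_iff, Bool.and_eq_false_iff,
    decide_eq_false_iff_not, Char.le_def, UInt32.le_iff_toNat_le,
    show ('0':Char).val.toNat = 48 from rfl, show ('9':Char).val.toNat = 57 from rfl,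
    show ('A':Char).val.toNat = 65 from rfl, show ('Z':Char).val.toNat = 90 from rfl,
    show ('a':Char).val.toNat = 97 from rfl, show ('z':Char).val.toNat = 122 from rfl] at *
  omega

lemma str_digit_not_alpha (c : String) (h : PySem.Chars.strIsdigit c.toList = true) :
    PySem.Chars.strIsalpha c.toList = false := by
  simp only [PySem.Chars.strIsdigit, PySem.Chars.strIsalpha, Bool.and_eq_true,
    List.all_eq_true, Bool.and_eq_false_iff] at h ⊢
  rcases h with ⟨hne, hall⟩
  right
  rw [List.all_eq_false]
  cases hc : c.toList with
  | nil => simp [hc] at hne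
  | cons x t => exact ⟨x, by simp, by simp [digit_not_alpha x (hall x (by simp [hc]))]⟩

lemma band_digit (c : String) :
    (!(PySem.Chars.strIsalpha c.toList) && PySem.Chars.strIsdigit c.toList) = PySem.Chars.strIsdigit c.toList := by
  by_cases h : PySem.Chars.strIsdigit c.toList = true
  · simp [h, str_digit_not_alpha c h]
  · simp [Bool.eq_false_iff.mpr h]

-- ===== VERDICT =====
theorem determine_aff_type_character_spec : Claim_equal_determine_aff_type_character := by
  intro char_list _
  unfold Spec_determine_aff_type_character determine_aff_type_character determine_aff_type_character_alt
  cases char_list with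
  | nil => rfl
  | cons first rest =>
    simp only [List.map_cons, pvGoA]
    by_cases ha : PySem.Chars.strIsalpha first.toList = true
    · have hc : pvClassify first = "alpha" := by
        simp [pvClassify, PySem.Str.strIsalpha_eq, ha]
      simp only [PySem.Str.strIsalpha_eq, ha, if_true, hc, pvGoA_alpha, set_len_one,
        show (("alpha":String) == "symbol") = false by decide, Bool.false_eq_true, if_false,
        List.all_map, Function.comp_def, classify_eq_alpha]
      by_cases h : (rest.all fun c => PySem.Chars.strIsalpha c.toList) = true
      · simp only [PySem.Str.strIsalpha_eq] at *; simp [h]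
      · simp only [PySem.Str.strIsalpha_eq] at *
        simp [Bool.eq_false_iff.mpr h]
    · by_cases hd : PySem.Chars.strIsdigit first.toList = true
      · have hc : pvClassify first = "digit" := by
          simp [pvClassify, PySem.Str.strIsalpha_eq, PySem.Str.strIsdigit_eq, ha, hd]
        have hall : (rest.map pvClassify).all (fun c => c == "digit")
            = rest.all (fun c => PySem.Chars.strIsdigit c.toList) := by
          simp only [List.all_map, Function.comp_def, classify_eq_digit, band_digit]
        simp only [PySem.Str.strIsalpha_eq, PySem.Str.strIsdigit_eq, ha, Bool.false_eq_true,
          if_false, hd, if_true, hc, pvGoA_digit, set_len_one,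
          show (("digit":String) == "symbol") = false by decide, hall]
        by_cases h : (rest.all fun c => PySem.Chars.strIsdigit c.toList) = true
        · simp only [PySem.Str.strIsdigit_eq] at *; simp [h]
        · simp only [PySem.Str.strIsdigit_eq] at *
          simp [Bool.eq_false_iff.mpr h]
      · have hc : pvClassify first = "symbol" := by
          simp [pvClassify, PySem.Str.strIsalpha_eq, PySem.Str.strIsdigit_eq, ha, hd]
        simp only [PySem.Str.strIsalpha_eq, PySem.Str.strIsdigit_eq, ha, hd,
          Bool.false_eq_true, if_false, hc]
        simp
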